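-- pv_equiv track=rewrite | github.com/neozan/puresed-backtest | src/func_get.py | get_fetch_timeframe
-- ===== SOURCE A (Python) =====
-- def get_fetch_timeframe(action_timeframe, interval_dict):
--     fetch_interval_dict = {
--         '1m': 1,
--         '5m': 5,
--         '15m': 15,
--         '1h': 60,
--         '4h': 240,
--         '1d': 1440
--     }
--
--     inverse_fetch_interval_dict = {v: k for k, v in fetch_interval_dict.items()}
--
--     fetch_interval_list = list(inverse_fetch_interval_dict.keys())
--     fetch_interval_list.sort(reverse=True)
--
--     for fetch_interval in fetch_interval_list:
--         if interval_dict[action_timeframe] % fetch_interval == 0: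
--             break
--
--     fetch_timeframe = inverse_fetch_interval_dict[fetch_interval]
--     step = int(interval_dict[action_timeframe] / fetch_interval)
--
--     return fetch_timeframe, step
-- ===== SOURCE B (Python) =====
-- def get_fetch_timeframe(action_timeframe, interval_dict):
--     target = interval_dict[action_timeframe]
--     # The six intervals form a divisibility chain 1 | 5 | 15 | 60 | 240 | 1440,
--     # so the largest one dividing target is found by climbing the chain:
--     # multiply in each step factor while the enlarged interval still divides target.
--     fetch_interval = 1
--     fetch_timeframe = '1m'
--     for factor, name in ((5, '5m'), (3, '15m'), (4, '1h'), (4, '4h'), (6, '1d')):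
--         if target % (fetch_interval * factor):
--             break
--         fetch_interval *= factor
--         fetch_timeframe = name
--     # fetch_interval divides target exactly, so // equals A's int(target / fetch_interval)
--     return fetch_timeframe, target // fetch_interval
-- ===== Notes on version B (the rewrite author's own statement) =====
-- stated objective: alternative
-- what changed: Replaces A's build-dict/invert/sort-descending/scan-for-first-divisor over the six interval values with an ascending chain climb: exploiting that 1|5|15|60|240|1440 is a divisibility chain, B multiplies step factors (5,3,4,4,6) into an accumulator while the enlarged interval still divides the target, carrying the name along; the exact division uses // which equals A's int(target/fetch_interval) because the chosen interval divides the target.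
import Mathlib
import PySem

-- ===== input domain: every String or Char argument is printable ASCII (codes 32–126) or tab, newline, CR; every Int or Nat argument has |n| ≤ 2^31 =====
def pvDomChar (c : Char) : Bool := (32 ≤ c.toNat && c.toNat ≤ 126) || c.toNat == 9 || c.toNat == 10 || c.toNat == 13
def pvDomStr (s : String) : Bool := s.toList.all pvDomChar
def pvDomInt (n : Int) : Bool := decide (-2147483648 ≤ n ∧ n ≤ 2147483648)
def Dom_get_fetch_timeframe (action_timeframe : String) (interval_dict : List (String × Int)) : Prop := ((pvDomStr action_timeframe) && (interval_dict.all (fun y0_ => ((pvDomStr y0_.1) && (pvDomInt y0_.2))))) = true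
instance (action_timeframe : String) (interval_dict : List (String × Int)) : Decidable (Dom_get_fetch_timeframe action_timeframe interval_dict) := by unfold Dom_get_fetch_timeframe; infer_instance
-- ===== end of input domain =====

-- B replaces A's invert/sort/descending scan for the first divisor with an ascending
-- climb of the divisibility chain 1|5|15|60|240|1440 by step factors (objective: alternative).

-- ===== PORT A =====
-- the for-loop with break: returns the first element whose test fires; if none fires,
-- the loop variable retains the LAST element (list is nonempty in A; [] case unreachable)
def pvFirstDiv (t : Int) : List Int → Int
  | [] => 0
  | [x] => x
  | x :: xs => if PySem.Int.mod t x = 0 then x else pvFirstDiv t xs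

def get_fetch_timeframe (action_timeframe : String) (interval_dict : List (String × Int)) : String × Int :=
  let fetch_interval_dict : PySem.Dict String Int :=
    PySem.Dict.ofList [("1m", 1), ("5m", 5), ("15m", 15), ("1h", 60), ("4h", 240), ("1d", 1440)]
  let inverse_fetch_interval_dict : PySem.Dict Int String :=
    fetch_interval_dict.items.foldl (fun d p => d.insert p.2 p.1) PySem.Dict.empty
  let fetch_interval_list : List Int :=
    PySem.List.sorted inverse_fetch_interval_dict.keys (fun x => x) true
  -- interval_dict[action_timeframe]: KeyError (excluded by Pre_) ported as getD with dummy default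
  let target : Int := PySem.Dict.getD (PySem.Dict.mk interval_dict) action_timeframe 0
  let fetch_interval : Int := pvFirstDiv target fetch_interval_list
  let fetch_timeframe : String := PySem.Dict.getD inverse_fetch_interval_dict fetch_interval ""
  -- int(target / fetch_interval): fetch_interval divides target here, so the float division is
  -- an exact integer and int() of it equals the exact quotient = floordiv (exact on this domain)
  let step : Int := PySem.Int.floordiv target fetch_interval
  (fetch_timeframe, step)

-- ===== PORT B =====
-- the climb loop with break: multiply in factors while divisibility holds, carrying the name
def pvClimb (t : Int) : Int → String → List (Int × String) → Int × String
  | fi, nm, [] => (fi, nm)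
  | fi, nm, (f, nx) :: rest =>
      if PySem.Int.mod t (fi * f) ≠ 0 then (fi, nm)
      else pvClimb t (fi * f) nx rest

def get_fetch_timeframe_alt (action_timeframe : String) (interval_dict : List (String × Int)) : String × Int :=
  let target : Int := PySem.Dict.getD (PySem.Dict.mk interval_dict) action_timeframe 0
  let r : Int × String :=
    pvClimb target 1 "1m" [(5, "5m"), (3, "15m"), (4, "1h"), (4, "4h"), (6, "1d")]
  (r.2, PySem.Int.floordiv target r.1)

-- ===== PRECONDITION & SPEC =====
-- Pre_ excludes exactly the inputs where interval_dict[action_timeframe] raises KeyError in A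
def Pre_get_fetch_timeframe (action_timeframe : String) (interval_dict : List (String × Int)) : Prop :=
  action_timeframe ∈ interval_dict.map Prod.fst
instance (action_timeframe : String) (interval_dict : List (String × Int)) : Decidable (Pre_get_fetch_timeframe action_timeframe interval_dict) := by unfold Pre_get_fetch_timeframe; infer_instance
def pvWitness_get_fetch_timeframe : String × (List (String × Int)) := ("1h", [("1h", 240)])

def Spec_get_fetch_timeframe (action_timeframe : String) (interval_dict : List (String × Int)) (out : String × Int) : Prop := out = get_fetch_timeframe_alt action_timeframe interval_dict
instance (action_timeframe : String) (interval_dict : List (String × Int)) (out : String × Int) : Decidable (Spec_get_fetch_timeframe action_timeframe interval_dict out) := by unfold Spec_get_fetch_timeframe; infer_instance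

-- ===== CLAIM (what is proved, stated in full; the proofs are below) =====
def Claim_equal_get_fetch_timeframe : Prop := ∀ (action_timeframe : String) (interval_dict : List (String × Int)), Dom_get_fetch_timeframe action_timeframe interval_dict → Pre_get_fetch_timeframe action_timeframe interval_dict → Spec_get_fetch_timeframe action_timeframe interval_dict (get_fetch_timeframe action_timeframe interval_dict)

-- ===== LEMMAS AND PROOFS =====

-- the core: A's descending first-divisor scan and B's ascending chain climb agree
-- as functions of the looked-up target value
lemma pv_core (t : Int) :
    (PySem.Dict.getD
        (PySem.Dict.ofList [((1:Int), "1m"), (5, "5m"), (15, "15m"), (60, "1h"), (240, "4h"), (1440, "1d")])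
        (pvFirstDiv t [1440, 240, 60, 15, 5, 1]) "",
      PySem.Int.floordiv t (pvFirstDiv t [1440, 240, 60, 15, 5, 1])) =
    ((pvClimb t 1 "1m" [(5, "5m"), (3, "15m"), (4, "1h"), (4, "4h"), (6, "1d")]).2,
      PySem.Int.floordiv t (pvClimb t 1 "1m" [(5, "5m"), (3, "15m"), (4, "1h"), (4, "4h"), (6, "1d")]).1) := by
  by_cases h1440 : (1440:Int) ∣ t
  · have d240 : (240:Int) ∣ t := dvd_trans (by norm_num) h1440
    have d60 : (60:Int) ∣ t := dvd_trans (by norm_num) h1440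
    have d15 : (15:Int) ∣ t := dvd_trans (by norm_num) h1440
    have d5 : (5:Int) ∣ t := dvd_trans (by norm_num) h1440
    norm_num [pvFirstDiv, pvClimb, h1440, d240, d60, d15, d5] <;> decide
  · by_cases h240 : (240:Int) ∣ t
    · have d60 : (60:Int) ∣ t := dvd_trans (by norm_num) h240
      have d15 : (15:Int) ∣ t := dvd_trans (by norm_num) h240
      have d5 : (5:Int) ∣ t := dvd_trans (by norm_num) h240
      norm_num [pvFirstDiv, pvClimb, h1440, h240, d60, d15, d5] <;> decide
    · by_cases h60 : (60:Int) ∣ t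
      · have d15 : (15:Int) ∣ t := dvd_trans (by norm_num) h60
        have d5 : (5:Int) ∣ t := dvd_trans (by norm_num) h60
        norm_num [pvFirstDiv, pvClimb, h1440, h240, h60, d15, d5] <;> decide
      · by_cases h15 : (15:Int) ∣ t
        · have d5 : (5:Int) ∣ t := dvd_trans (by norm_num) h15
          norm_num [pvFirstDiv, pvClimb, h1440, h240, h60, h15, d5] <;> decide
        · by_cases h5 : (5:Int) ∣ t
          · norm_num [pvFirstDiv, pvClimb, h1440, h240, h60, h15, h5] <;> decide
          · norm_num [pvFirstDiv, pvClimb, h1440, h240, h60, h15, h5] <;> decide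

lemma pv_agree (a : String) (d : List (String × Int)) :
    get_fetch_timeframe a d = get_fetch_timeframe_alt a d := by
  have hname : ((PySem.Dict.ofList [("1m", (1:Int)), ("5m", 5), ("15m", 15), ("1h", 60), ("4h", 240), ("1d", 1440)]).items.foldl
        (fun d p => d.insert p.2 p.1) PySem.Dict.empty)
      = PySem.Dict.ofList [((1:Int), "1m"), (5, "5m"), (15, "15m"), (60, "1h"), (240, "4h"), (1440, "1d")] := by decide
  have hlist2 : PySem.List.sorted
      (PySem.Dict.ofList [((1:Int), "1m"), (5, "5m"), (15, "15m"), (60, "1h"), (240, "4h"), (1440, "1d")]).keys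
      (fun x => x) true = [1440, 240, 60, 15, 5, 1] := by decide
  simp only [get_fetch_timeframe, get_fetch_timeframe_alt, hname, hlist2]
  exact pv_core (PySem.Dict.getD (PySem.Dict.mk d) a 0)

-- ===== VERDICT (by name: the statement is the Claim_ definition above) =====
theorem get_fetch_timeframe_spec : Claim_equal_get_fetch_timeframe := by
  intro a d _ _
  unfold Spec_get_fetch_timeframe
  exact pv_agree a d
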